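-- pv_equiv track=rewrite | github.com/swamintn/home-base | python/math_tricks.py | powers_of_2
-- ===== SOURCE A (Python) =====
-- def powers_of_2(num):
--     """
--     Splits a number into powers of 2
--     """
--     powers = []
--     i = 1
--     while i <= num:
--         if i & num:
--             powers.append(i)
--         i = i << 1
--     return powers
-- ===== SOURCE B (Python) =====
-- def powers_of_2(num):
--     """
--     Splits a number into powers of 2
--     """
--     powers = []
--     while num > 0:
--         low = num & -num
--         powers.append(low)
--         num -= low
--     return powers
-- ===== Notes on version B (the rewrite author's own statement) =====
-- stated objective: alternative
-- what changed: B repeatedly peels the lowest set bit with num & -num (visiting only set bits, ascending) instead of shifting a probe i over every bit position up to num.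
import Mathlib
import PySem

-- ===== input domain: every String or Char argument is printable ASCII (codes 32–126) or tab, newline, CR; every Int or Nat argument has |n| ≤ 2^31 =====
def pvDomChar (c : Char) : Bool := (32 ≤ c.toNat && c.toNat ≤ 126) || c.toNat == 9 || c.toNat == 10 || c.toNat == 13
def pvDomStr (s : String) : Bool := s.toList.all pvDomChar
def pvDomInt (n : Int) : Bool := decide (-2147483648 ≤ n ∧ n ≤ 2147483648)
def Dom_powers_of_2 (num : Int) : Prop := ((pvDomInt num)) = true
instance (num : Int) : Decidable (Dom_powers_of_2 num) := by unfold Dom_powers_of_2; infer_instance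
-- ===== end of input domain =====

-- B replaces A's shift-and-test scan over every bit position up to num by repeatedly peeling the
-- lowest set bit with num & -num (one iteration per set bit); same return value on every int.

-- ===== PORT A =====
-- bit-arithmetic facts cited by the ports (termination and positivity of the loop variables)
theorem tbE (a j : Nat) : (2*a).testBit (j+1) = a.testBit j := by
  rw [Nat.testBit_succ]; congr 1; omega

theorem tbO (a j : Nat) : (2*a+1).testBit (j+1) = a.testBit j := by
  rw [Nat.testBit_succ]; congr 1; omega

theorem ldiff_odd (m : Nat) : Nat.ldiff (2*m+1) (2*m) = 1 := by
  apply Nat.eq_of_testBit_eq; intro i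
  cases i with
  | zero =>
    have h1 : (2*m+1) % 2 = 1 := by omega
    have h2 : (2*m) % 2 = 0 := by omega
    rw [Nat.testBit_ldiff, Nat.testBit_zero, Nat.testBit_zero]
    simp [h1, h2]
  | succ j => rw [Nat.testBit_ldiff, tbO, tbE]; simp [Nat.testBit_succ]

theorem ldiff_even (j : Nat) : Nat.ldiff (2*(j+1)) (2*(j+1)-1) = 2 * Nat.ldiff (j+1) j := by
  apply Nat.eq_of_testBit_eq; intro i
  cases i with
  | zero =>
    have h1 : (2*(j+1)) % 2 = 0 := by omega
    have h2 : (2*Nat.ldiff (j+1) j) % 2 = 0 := by omega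
    rw [Nat.testBit_ldiff, Nat.testBit_zero, Nat.testBit_zero, Nat.testBit_zero]
    simp [h1, h2]
  | succ i => rw [Nat.testBit_ldiff, tbE, show 2*(j+1)-1 = 2*j+1 from by omega, tbO, tbE, ← Nat.testBit_ldiff]

theorem lowbit_pos : ∀ k : Nat, 0 < Nat.ldiff (k+1) k := by
  intro k
  induction k using Nat.strong_induction_on with
  | _ k IH =>
    rcases Nat.even_or_odd k with ⟨j, hj⟩ | ⟨j, hj⟩
    · subst hj; rw [show j+j = 2*j from by omega, ldiff_odd]; omega
    · subst hj
      have h := ldiff_even j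
      rw [show 2*j+1+1 = 2*(j+1) from by omega, show 2*j+1 = 2*(j+1)-1 from by omega, h]
      have := IH j (by omega); omega

-- Int transfer

theorem int_neg_natCast_succ (k : Nat) : -(((k+1:Nat)):Int) = Int.negSucc k := rfl

theorem int_land_negSucc (a k : Nat) : Int.land (a:Int) (Int.negSucc k) = ((Nat.ldiff a k : Nat) : Int) := rfl

theorem int_low_pos (n : Int) (hn : 0 < n) : 0 < Int.land n (-n) := by
  obtain ⟨k, rfl⟩ : ∃ k : Nat, n = ((k+1:Nat):Int) := ⟨(n-1).toNat, by push_cast; omega⟩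
  rw [int_neg_natCast_succ, int_land_negSucc]
  exact_mod_cast lowbit_pos k

theorem int_shl_one (i : Int) : i <<< (1:Int) = 2 * i := by
  rw [show (1:Int) = ((1:Nat):Int) from rfl, Int.shiftLeft_natCast_right, Int.shiftLeft_eq]; ring

def pow2Loop (num i : Int) (hi : 0 < i) (powers : List Int) : List Int :=
  if _h : i ≤ num then
    pow2Loop num (i <<< (1:Int)) (by rw [int_shl_one]; omega)
      (if Int.land i num ≠ 0 then powers ++ [i] else powers)
  else powers
  termination_by (num + 1 - i).toNat
  decreasing_by simp only [int_shl_one]; omega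

def powers_of_2 (num : Int) : List Int := pow2Loop num 1 one_pos []

-- ===== PORT B =====
def altLoop (num : Int) (acc : List Int) : List Int :=
  if h : 0 < num then
    altLoop (num - Int.land num (-num)) (acc ++ [Int.land num (-num)])
  else acc
  termination_by num.toNat
  decreasing_by have := int_low_pos num h; omega

def powers_of_2_alt (num : Int) : List Int := altLoop num []

-- ===== PRECONDITION & SPEC =====
def Spec_powers_of_2 (num : Int) (out : List Int) : Prop := out = powers_of_2_alt num
instance (num : Int) (out : List Int) : Decidable (Spec_powers_of_2 num out) := by unfold Spec_powers_of_2; infer_instance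

-- ===== CLAIM (what is proved, stated in full; the proofs are below) =====
def Claim_equal_powers_of_2 : Prop := ∀ (num : Int), Dom_powers_of_2 num → Spec_powers_of_2 num (powers_of_2 num)

-- ===== LEMMAS AND PROOFS =====
theorem land_one_odd (k : Nat) : (1 &&& (2*k+1)) = 1 := by
  apply Nat.eq_of_testBit_eq; intro i; cases i <;> simp [Nat.testBit_succ, Nat.testBit_zero]

theorem land_one_even (k : Nat) : (1 &&& (2*k)) = 0 := by
  apply Nat.eq_of_testBit_eq; intro i
  cases i <;> simp [Nat.testBit_succ, Nat.testBit_zero]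

theorem land_scale (a b c : Nat) (hc : c = 0 ∨ c = 1) : ((2*a) &&& (2*b+c)) = 2*(a &&& b) := by
  apply Nat.eq_of_testBit_eq; intro i
  cases i with
  | zero =>
    have h1 : (2*a) % 2 = 0 := by omega
    have h2 : (2*(a &&& b)) % 2 = 0 := by omega
    simp [Nat.testBit_land, Nat.testBit_zero, h1, h2]
  | succ j =>
    have hb : (2*b+c).testBit (j+1) = b.testBit j := by
      rcases hc with rfl | rfl
      · rw [show 2*b+0 = 2*b from by omega, tbE]
      · rw [tbO]
    rw [Nat.testBit_land, hb, tbE, tbE, ← Nat.testBit_land]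

theorem int_land_natCast (a b : Nat) : Int.land (a:Int) (b:Int) = ((a &&& b : Nat) : Int) := rfl

theorem int_low_odd (m : Int) (hm : 0 ≤ m) : Int.land (2*m+1) (-(2*m+1)) = 1 := by
  obtain ⟨k, rfl⟩ := Int.eq_ofNat_of_zero_le hm
  have e : (2*(k:Int)+1) = ((2*k+1:Nat):Int) := by push_cast; ring
  rw [e, show ((2*k+1:Nat):Int) = ((2*k+1-1)+1:Nat) from by norm_num, int_neg_natCast_succ, int_land_negSucc]
  rw [show (2*k+1-1 : Nat) = 2*k from by omega, ldiff_odd]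
  rfl

theorem int_low_even (m : Int) (hm : 0 < m) : Int.land (2*m) (-(2*m)) = 2 * Int.land m (-m) := by
  obtain ⟨j, rfl⟩ : ∃ j : Nat, m = ((j+1:Nat):Int) := ⟨(m-1).toNat, by push_cast; omega⟩
  have e : (2*((j+1:Nat):Int)) = ((2*(j+1):Nat):Int) := by push_cast; ring
  rw [e, show ((2*(j+1):Nat):Int) = (((2*(j+1)-1)+1:Nat):Int) from by norm_num, int_neg_natCast_succ,
     int_land_negSucc, show (2*(j+1)-1+1 : Nat) = 2*(j+1) from by omega, ldiff_even,
     int_neg_natCast_succ, int_land_negSucc]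
  push_cast; ring

theorem int_land_one_odd (m : Int) (hm : 0 ≤ m) : Int.land 1 (2*m+1) = 1 := by
  obtain ⟨k, rfl⟩ := Int.eq_ofNat_of_zero_le hm
  rw [show (2*(k:Int)+1) = ((2*k+1:Nat):Int) from by push_cast; ring,
      show (1:Int) = ((1:Nat):Int) from rfl, int_land_natCast, land_one_odd]

theorem int_land_one_even (m : Int) (hm : 0 ≤ m) : Int.land 1 (2*m) = 0 := by
  obtain ⟨k, rfl⟩ := Int.eq_ofNat_of_zero_le hm
  rw [show (2*(k:Int)) = ((2*k:Nat):Int) from by push_cast; ring,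
      show (1:Int) = ((1:Nat):Int) from rfl, int_land_natCast, land_one_even]
  rfl

theorem int_land_scale (a b c : Int) (ha : 0 ≤ a) (hb : 0 ≤ b) (hc : c = 0 ∨ c = 1) :
    Int.land (2*a) (2*b+c) = 2 * Int.land a b := by
  obtain ⟨x, rfl⟩ := Int.eq_ofNat_of_zero_le ha
  obtain ⟨y, rfl⟩ := Int.eq_ofNat_of_zero_le hb
  obtain ⟨z, hz⟩ : ∃ z : Nat, c = (z:Int) ∧ (z = 0 ∨ z = 1) := by
    rcases hc with rfl | rfl
    · exact ⟨0, rfl, Or.inl rfl⟩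
    · exact ⟨1, rfl, Or.inr rfl⟩
  rw [hz.1, show (2*(x:Int)) = ((2*x:Nat):Int) from by push_cast; ring,
      show (2*(y:Int)+(z:Int)) = ((2*y+z:Nat):Int) from by push_cast; ring,
      int_land_natCast, land_scale x y z hz.2, int_land_natCast]
  push_cast; ring

theorem pow2Loop_append (num : Int) : ∀ (i : Int) (hi : 0 < i) (acc : List Int),
    pow2Loop num i hi acc = acc ++ pow2Loop num i hi [] := by
  intro i
  induction hm : (num + 1 - i).toNat using Nat.strong_induction_on generalizing i with
  | _ n IH =>
    intro hi acc
    by_cases h : i ≤ num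
    · conv_lhs => rw [pow2Loop]
      conv_rhs => rw [pow2Loop]
      rw [dif_pos h, dif_pos h]
      have hlt : (num + 1 - i <<< (1:Int)).toNat < n := by rw [int_shl_one]; omega
      rw [IH _ hlt (i <<< (1:Int)) rfl, IH _ hlt (i <<< (1:Int)) rfl (hi := by rw [int_shl_one]; omega)
        (acc := (if Int.land i num ≠ 0 then [] ++ [i] else []))]
      by_cases hb : Int.land i num ≠ 0 <;> simp [hb]
    · conv_lhs => rw [pow2Loop]
      conv_rhs => rw [pow2Loop]
      rw [dif_neg h, dif_neg h]
      simp

theorem altLoop_append (num : Int) : ∀ (acc : List Int),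
    altLoop num acc = acc ++ altLoop num [] := by
  induction hm : num.toNat using Nat.strong_induction_on generalizing num with
  | _ n IH =>
    intro acc
    by_cases h : 0 < num
    · conv_lhs => rw [altLoop]
      conv_rhs => rw [altLoop]
      rw [dif_pos h, dif_pos h]
      have hp := int_low_pos num h
      have hlt : (num - Int.land num (-num)).toNat < n := by omega
      rw [IH _ hlt _ rfl, IH _ hlt (num - Int.land num (-num)) rfl (acc := [] ++ [Int.land num (-num)])]
      simp
    · conv_lhs => rw [altLoop]
      conv_rhs => rw [altLoop]
      rw [dif_neg h, dif_neg h]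
      simp

theorem pow2Loop_scale (n b : Int) (hn : 0 ≤ n) (hb : b = 0 ∨ b = 1) :
    ∀ (i : Int) (hi : 0 < i) (h2 : 0 < 2*i),
    pow2Loop (2*n+b) (2*i) h2 [] = (pow2Loop n i hi []).map (fun x => 2*x) := by
  intro i
  induction hm : (n + 1 - i).toNat using Nat.strong_induction_on generalizing i with
  | _ m IH =>
    intro hi h2
    by_cases h : i ≤ n
    · have hlt : (n + 1 - 2*i).toNat < m := by omega
      have h' : 2*i ≤ 2*n+b := by rcases hb with rfl | rfl <;> omega
      conv_lhs => rw [pow2Loop]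
      conv_rhs => rw [pow2Loop]
      rw [dif_pos h', dif_pos h]
      rw [int_land_scale i n b (le_of_lt hi) hn hb]
      by_cases hcc : Int.land i n = 0
      · rw [if_neg (by simp [hcc]), if_neg (by simp [hcc])]
        simp only [int_shl_one]
        exact IH _ hlt (2*i) rfl (by omega) (by omega)
      · rw [if_pos (by omega), if_pos hcc]
        rw [pow2Loop_append, pow2Loop_append n]
        simp only [int_shl_one]
        rw [IH _ hlt (2*i) rfl (by omega) (by omega)]
        simp
    · have h' : ¬ (2*i ≤ 2*n+b) := by rcases hb with rfl | rfl <;> omega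
      conv_lhs => rw [pow2Loop]
      conv_rhs => rw [pow2Loop]
      rw [dif_neg h', dif_neg h]
      simp

theorem powA_nonpos (n : Int) (hn : n ≤ 0) : powers_of_2 n = [] := by
  unfold powers_of_2
  rw [pow2Loop, dif_neg (by omega)]

theorem powA_odd (m : Int) (hm : 0 ≤ m) :
    powers_of_2 (2*m+1) = 1 :: (powers_of_2 m).map (fun x => 2*x) := by
  unfold powers_of_2
  conv_lhs => rw [pow2Loop]
  rw [dif_pos (by omega), if_pos (by rw [int_land_one_odd m hm]; norm_num)]
  rw [pow2Loop_append]
  have hs := pow2Loop_scale m 1 hm (Or.inr rfl) 1 one_pos (by omega)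
  simp only [int_shl_one]
  rw [hs]
  simp

theorem powA_even (m : Int) (hm : 0 ≤ m) :
    powers_of_2 (2*m) = (powers_of_2 m).map (fun x => 2*x) := by
  unfold powers_of_2
  by_cases h0 : m = 0
  · subst h0
    rw [pow2Loop, dif_neg (by omega), pow2Loop, dif_neg (by omega)]
    simp
  · conv_lhs => rw [pow2Loop]
    rw [dif_pos (by omega), if_neg (by rw [int_land_one_even m hm]; norm_num)]
    have hs := pow2Loop_scale m 0 hm (Or.inl rfl) 1 one_pos (by omega)
    rw [show (2*m+0 : Int) = 2*m from by ring] at hs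
    simp only [int_shl_one]
    rw [hs]

theorem powB_nonpos (n : Int) (hn : n ≤ 0) : powers_of_2_alt n = [] := by
  unfold powers_of_2_alt
  rw [altLoop, dif_neg (by omega)]

theorem powB_step (n : Int) (hn : 0 < n) :
    powers_of_2_alt n = Int.land n (-n) :: powers_of_2_alt (n - Int.land n (-n)) := by
  unfold powers_of_2_alt
  conv_lhs => rw [altLoop]
  rw [dif_pos hn, altLoop_append]
  simp

theorem powB_odd (m : Int) (hm : 0 ≤ m) :
    powers_of_2_alt (2*m+1) = 1 :: powers_of_2_alt (2*m) := by
  rw [powB_step _ (by omega), int_low_odd m hm, show 2*m+1-(1:Int) = 2*m from by ring]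

theorem powB_even : ∀ (m : Int), 0 ≤ m → powers_of_2_alt (2*m) = (powers_of_2_alt m).map (fun x => 2*x) := by
  intro m
  induction hm : m.toNat using Nat.strong_induction_on generalizing m with
  | _ k IH =>
    intro hm0
    by_cases h : 0 < m
    · have hlow := int_low_pos m h
      rw [powB_step (2*m) (by omega), int_low_even m h, powB_step m h]
      rw [show 2*m - 2*Int.land m (-m) = 2*(m - Int.land m (-m)) from by ring]
      by_cases h2 : 0 ≤ m - Int.land m (-m)
      · rw [IH _ (by omega) _ rfl h2]
        simp
      · rw [powB_nonpos _ (by omega), powB_nonpos _ (by omega)]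
        simp
    · have h0 : m = 0 := by omega
      subst h0
      rw [show 2*(0:Int) = 0 from by ring, powB_nonpos 0 le_rfl]
      simp

theorem powAB (n : Int) : powers_of_2 n = powers_of_2_alt n := by
  induction hm : n.toNat using Nat.strong_induction_on generalizing n with
  | _ k IH =>
    by_cases h : 0 < n
    · obtain ⟨m, b, hb, rfl⟩ : ∃ m b : Int, (b = 0 ∨ b = 1) ∧ n = 2*m+b :=
        ⟨n/2, n%2, by omega, by omega⟩
      rcases hb with rfl | rfl
      · rw [show 2*m+(0:Int) = 2*m from by ring] at *
        rw [powA_even m (by omega), powB_even m (by omega), IH _ (by omega) m rfl]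
      · rw [powA_odd m (by omega), powB_odd m (by omega), powB_even m (by omega),
           IH _ (by omega) m rfl]
    · rw [powA_nonpos n (by omega), powB_nonpos n (by omega)]

-- ===== VERDICT (by name: the statement is the Claim_ definition above) =====
theorem powers_of_2_spec : Claim_equal_powers_of_2 := by
  intro num _
  show powers_of_2 num = powers_of_2_alt num
  exact powAB num
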